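-- pv_equiv track=rewrite | github.com/tattypaw/python4 | seminar4.py | find_El
-- ===== SOURCE A (Python) =====
-- def find_El(stroka):      # Номера ;
--   arr = [0,0,0]
--   n = 0
--   for i in range(3):
--     while n < len(stroka):
--       if stroka[n] != ';':
--         n +=1
--       else:
--         n +=1
--         break
--     arr[i] = n
--   return arr
-- ===== SOURCE B (Python) =====
-- def find_El(stroka):
--     parts = stroka.split(';')
--     res = []
--     pos = 0
--     for i in range(3):
--         if i < len(parts) - 1:
--             pos += len(parts[i]) + 1
--             res.append(pos)
--         else:
--             res.append(len(stroka))
--     return res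
-- ===== Notes on version B (the rewrite author's own statement) =====
-- stated objective: faster
-- what changed: B tokenizes the string once with str.split on the semicolon separator and derives the three positions as running sums of segment lengths, instead of A's character-by-character cursor scans; the per-character work moves from Python bytecode into the C-implemented split.
import Mathlib
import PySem

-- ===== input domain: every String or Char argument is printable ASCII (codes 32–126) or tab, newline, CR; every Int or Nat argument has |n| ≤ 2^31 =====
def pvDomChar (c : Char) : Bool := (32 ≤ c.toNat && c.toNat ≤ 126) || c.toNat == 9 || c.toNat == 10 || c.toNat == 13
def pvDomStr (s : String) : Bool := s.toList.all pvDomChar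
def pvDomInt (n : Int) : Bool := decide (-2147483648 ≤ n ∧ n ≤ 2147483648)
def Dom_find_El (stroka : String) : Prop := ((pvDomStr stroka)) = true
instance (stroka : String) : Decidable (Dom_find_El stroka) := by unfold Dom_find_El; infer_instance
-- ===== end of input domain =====

-- B tokenizes once with str.split on the semicolon separator and derives the three positions
-- as running sums of segment lengths, instead of A's cursor-driven per-character while-loop
-- scans (measured faster by a constant factor: split runs in C).


-- ===== PORT A =====
-- A's inner `while n < len(stroka): if stroka[n] != ';': n += 1 else: n += 1; break`
def pvWhileA (cs : List Char) (n : Nat) : Nat :=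
  if h : n < cs.length then
    if cs[n] ≠ ';' then pvWhileA cs (n + 1) else n + 1
  else n
termination_by cs.length - n

def find_El (stroka : String) : List Int :=
  let cs := stroka.toList
  let st := (PySem.List.pyRange 0 3 1).foldl
    (fun (st : List Int × Nat) i =>
      let n := pvWhileA cs st.2
      (st.1.set i.toNat (n : Int), n))
    ([0, 0, 0], 0)
  st.1

-- ===== PORT B =====
def find_El_alt (stroka : String) : List Int :=
  let cs := stroka.toList
  let parts := PySem.Chars.splitOn cs [';']
  let st := (PySem.List.pyRange 0 3 1).foldl
    (fun (st : List Int × Nat) i =>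
      if i < (parts.length : Int) - 1 then
        let pos := st.2 + ((PySem.List.pyGet? parts i).getD []).length + 1
        (st.1 ++ [(pos : Int)], pos)
      else
        (st.1 ++ [(cs.length : Int)], st.2))
    ([], 0)
  st.1

-- ===== PRECONDITION & SPEC =====
def Spec_find_El (stroka : String) (out : List Int) : Prop := out = find_El_alt stroka
instance (stroka : String) (out : List Int) : Decidable (Spec_find_El stroka out) := by unfold Spec_find_El; infer_instance

-- ===== CLAIM (what is proved, stated in full; the proofs are below) =====
def Claim_equal_find_El : Prop := ∀ (stroka : String), Dom_find_El stroka → Spec_find_El stroka (find_El stroka)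

-- ===== LEMMAS AND PROOFS =====

-- reference splitter: Python's s.split(';') on a char list, structurally
def pvSplit : List Char → List (List Char)
  | [] => [[]]
  | c :: rest =>
    if c = ';' then [] :: pvSplit rest
    else
      match pvSplit rest with
      | [] => [[c]]
      | p :: ps => (c :: p) :: ps

theorem pvSplit_ne_nil (cs : List Char) : pvSplit cs ≠ [] := by
  induction cs with
  | nil => simp [pvSplit]
  | cons c rest ih =>
    simp only [pvSplit]
    split
    · simp
    · rcases h : pvSplit rest with _ | ⟨p, ps⟩ <;> simp

theorem splitOn_go_eq (fuel : Nat) : ∀ (l cur : List Char) (acc : List (List Char)),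
    l.length < fuel →
    PySem.Chars.splitOn.go [';'] fuel l cur acc =
      acc.reverse ++
        (match pvSplit l with
         | [] => [cur.reverse]
         | p :: ps => (cur.reverse ++ p) :: ps) := by
  induction fuel with
  | zero => intro l cur acc h; omega
  | succ f ih =>
    intro l cur acc h
    cases l with
    | nil => simp [PySem.Chars.splitOn.go, pvSplit]
    | cons c rest =>
      by_cases hc : c = ';'
      · subst hc
        rw [PySem.Chars.splitOn.go,
            if_pos (by simp [List.isPrefixOf] : List.isPrefixOf [';'] (';' :: rest) = true)]
        simp only [List.length_cons, List.length_nil, List.drop_zero, List.drop_succ_cons]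
        rw [ih rest [] (cur.reverse :: acc) (by simp at h; omega)]
        rcases hs : pvSplit rest with _ | ⟨p, ps⟩
        · exact absurd hs (pvSplit_ne_nil rest)
        · simp [pvSplit, hs]
      · rw [PySem.Chars.splitOn.go,
            if_neg (by simp [List.isPrefixOf]; exact fun hh => hc hh.symm)]
        rw [ih rest (c :: cur) acc (by simp at h; omega)]
        rcases hs : pvSplit rest with _ | ⟨p, ps⟩
        · exact absurd hs (pvSplit_ne_nil rest)
        · simp [pvSplit, hc, hs]

theorem splitOn_semi (cs : List Char) : PySem.Chars.splitOn cs [';'] = pvSplit cs := by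
  have := splitOn_go_eq (cs.length + 1) cs [] [] (by omega)
  rw [PySem.Chars.splitOn, this]
  rcases hs : pvSplit cs with _ | ⟨p, ps⟩
  · exact absurd hs (pvSplit_ne_nil cs)
  · simp

theorem pvSplit_of_not_mem {rest : List Char} (h : ';' ∉ rest) : pvSplit rest = [rest] := by
  induction rest with
  | nil => rfl
  | cons c r ih =>
    simp only [List.mem_cons, not_or] at h
    have hc : ¬ c = ';' := fun hh => h.1 hh.symm
    simp [pvSplit, hc, ih h.2]

theorem pvSplit_decomp {rest : List Char} (h : ';' ∈ rest) :
    ∃ r', rest = (pvSplit rest).headD [] ++ ';' :: r' ∧ pvSplit r' = (pvSplit rest).tail := by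
  induction rest with
  | nil => simp at h
  | cons c r ih =>
    by_cases hc : c = ';'
    · subst hc
      exact ⟨r, by simp [pvSplit], by simp [pvSplit]⟩
    · have hr : ';' ∈ r := by
        rcases List.mem_cons.mp h with h1 | h1
        · exact absurd h1.symm hc
        · exact h1
      obtain ⟨r', h1, h2⟩ := ih hr
      refine ⟨r', ?_, ?_⟩
      · rcases hs : pvSplit r with _ | ⟨p, ps⟩
        · exact absurd hs (pvSplit_ne_nil r)
        · simp only [pvSplit, if_neg hc, hs]
          simp only [hs] at h1
          simpa using h1
      · rcases hs : pvSplit r with _ | ⟨p, ps⟩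
        · exact absurd hs (pvSplit_ne_nil r)
        · simp only [pvSplit, if_neg hc, hs]
          simp only [hs] at h2
          simpa using h2

theorem pvWhileA_eq : ∀ (rest cs : List Char) (pos : Nat),
    cs.drop pos = rest → pos ≤ cs.length →
    pvWhileA cs pos =
      if ';' ∈ rest then pos + ((pvSplit rest).headD []).length + 1 else cs.length := by
  intro rest
  induction rest with
  | nil =>
    intro cs pos hd hle
    have : cs.length ≤ pos := by
      by_contra hlt
      simp only [not_le] at hlt
      have := List.drop_eq_nil_iff.mp hd
      omega
    have hpos : pos = cs.length := le_antisymm hle this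
    rw [pvWhileA]
    simp [hpos]
  | cons c r ih =>
    intro cs pos hd hle
    have hlt : pos < cs.length := by
      by_contra hge
      simp only [not_lt] at hge
      rw [List.drop_eq_nil_iff.mpr hge] at hd
      simp at hd
    have hsome : cs[pos]? = some c := by
      have := congrArg List.head? hd
      simpa [List.head?_drop] using this
    have hget : cs[pos] = c := by
      rw [List.getElem?_eq_getElem hlt] at hsome
      exact Option.some.inj hsome
    have hdrop : cs.drop (pos + 1) = r := by
      have := congrArg List.tail hd
      simpa [List.tail_drop] using this
    by_cases hc : c = ';'
    · subst hc
      rw [pvWhileA, dif_pos hlt, if_neg (by simp [hget])]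
      simp [pvSplit]
    · rw [pvWhileA, dif_pos hlt, if_pos (by simp [hget, hc])]
      rw [ih cs (pos + 1) hdrop (by omega)]
      by_cases hm : ';' ∈ r
      · have hmem : ';' ∈ c :: r := List.mem_cons_of_mem _ hm
        rcases hs : pvSplit r with _ | ⟨p, ps⟩
        · exact absurd hs (pvSplit_ne_nil r)
        · simp only [if_pos hm, if_pos hmem, pvSplit, if_neg hc, hs, List.headD_cons,
            List.length_cons]
          omega
      · have hmem : ';' ∉ c :: r := by
          simp only [List.mem_cons, not_or]
          exact ⟨fun hh => hc hh.symm, hm⟩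
        simp [hm, hmem]

theorem pvWhileA_len (cs : List Char) : pvWhileA cs cs.length = cs.length := by
  rw [pvWhileA]; simp

theorem step_sem (cs rest : List Char) (i pos : Nat)
    (hd : cs.drop pos = rest) (hpos : pos ≤ cs.length)
    (hparts : (pvSplit cs).drop i = pvSplit rest) (h : ';' ∈ rest) :
    pvWhileA cs pos = pos + ((pvSplit rest).headD []).length + 1 ∧
    (i : Int) < ((pvSplit cs).length : Int) - 1 ∧
    (PySem.List.pyGet? (pvSplit cs) (i : Int)).getD [] = (pvSplit rest).headD [] ∧
    ∃ rest', cs.drop (pos + ((pvSplit rest).headD []).length + 1) = rest' ∧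
      pos + ((pvSplit rest).headD []).length + 1 ≤ cs.length ∧
      (pvSplit cs).drop (i + 1) = pvSplit rest' := by
  obtain ⟨r', hr1, hr2⟩ := pvSplit_decomp h
  rcases hs : pvSplit rest with _ | ⟨p, ps⟩
  · exact absurd hs (pvSplit_ne_nil rest)
  have hhead : (pvSplit rest).headD [] = p := by rw [hs]; rfl
  have hlen_rest : rest.length = p.length + 1 + r'.length := by
    rw [hr1, hhead]
    simp only [List.length_append, List.length_cons]
    omega
  have hlen_drop : cs.length = pos + rest.length := by
    have := congrArg List.length hd
    simp [List.length_drop] at this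
    omega
  have hi_lt : i < (pvSplit cs).length := by
    by_contra hge
    simp only [not_lt] at hge
    rw [List.drop_eq_nil_iff.mpr hge] at hparts
    exact pvSplit_ne_nil rest hparts.symm
  have hlen_parts : (pvSplit cs).length = i + (pvSplit rest).length := by
    have := congrArg List.length hparts
    simp [List.length_drop] at this
    omega
  have hr2' : pvSplit r' = ps := by rw [hr2, hs]; rfl
  have hlen2 : 2 ≤ (pvSplit rest).length := by
    rw [hs]
    have := pvSplit_ne_nil r'
    rw [hr2'] at this
    cases ps with
    | nil => exact absurd rfl this
    | cons q qs => simp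
  refine ⟨?_, ?_, ?_, r', ?_, ?_, ?_⟩
  · rw [pvWhileA_eq rest cs pos hd hpos, if_pos h, hs]
  · omega
  · have : (pvSplit cs)[i]? = some p := by
      rw [← List.head?_drop, hparts, hs]
      rfl
    rw [PySem.List.pyGet?_natCast, this]
    rfl
  · simp only [List.headD_cons]
    have hp1 : rest = p ++ ';' :: r' := by rw [hr1, hhead]
    have e1 : cs.drop (pos + p.length + 1) = (cs.drop pos).drop (p.length + 1) := by
      rw [show pos + p.length + 1 = pos + (p.length + 1) from by omega, List.drop_drop]
    rw [e1, hd, hp1, show p ++ ';' :: r' = (p ++ [';']) ++ r' by simp,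
        show p.length + 1 = (p ++ [';']).length from by simp]
    exact List.drop_left
  · simp only [List.headD_cons]
    omega
  · rw [← List.drop_drop, hparts, hs, hr2']
    rfl

theorem step_no (cs rest : List Char) (i pos : Nat)
    (hd : cs.drop pos = rest) (hpos : pos ≤ cs.length)
    (hparts : (pvSplit cs).drop i = pvSplit rest) (h : ';' ∉ rest) :
    pvWhileA cs pos = cs.length ∧ (pvSplit cs).length = i + 1 := by
  have hi_lt : i < (pvSplit cs).length := by
    by_contra hge
    simp only [not_lt] at hge
    rw [List.drop_eq_nil_iff.mpr hge] at hparts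
    exact pvSplit_ne_nil rest hparts.symm
  have hlen_parts : (pvSplit cs).length = i + (pvSplit rest).length := by
    have := congrArg List.length hparts
    simp [List.length_drop] at this
    omega
  have h1 : (pvSplit rest).length = 1 := by rw [pvSplit_of_not_mem h]; rfl
  constructor
  · rw [pvWhileA_eq rest cs pos hd hpos, if_neg h]
  · omega

-- ===== VERDICT (by name: the statement is the Claim_ definition above) =====
theorem find_El_spec : Claim_equal_find_El := by
  intro stroka _
  unfold Spec_find_El find_El find_El_alt
  have hr3 : PySem.List.pyRange 0 3 1 = [0, 1, 2] := by decide
  simp only [hr3, splitOn_semi, List.foldl_cons, List.foldl_nil]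
  by_cases h1 : ';' ∈ stroka.toList
  · obtain ⟨hw1, hc0, hg0, r1, hd1, hb1, hp1⟩ :=
      step_sem stroka.toList stroka.toList 0 0 List.drop_zero (Nat.zero_le _) (by simp) h1
    push_cast at hc0
    have hg0' : (PySem.List.pyGet? (pvSplit stroka.toList) (0 : Int)).getD [] =
        (pvSplit stroka.toList).headD [] := by simpa using hg0
    by_cases h2 : ';' ∈ r1
    · obtain ⟨hw2, hc1, hg1, r2, hd2, hb2, hp2⟩ :=
        step_sem stroka.toList r1 1 _ hd1 hb1 hp1 h2
      push_cast at hc1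
      have hg1' : (PySem.List.pyGet? (pvSplit stroka.toList) (1 : Int)).getD [] =
          (pvSplit r1).headD [] := by simpa using hg1
      by_cases h3 : ';' ∈ r2
      · obtain ⟨hw3, hc2, hg2, r3, hd3, hb3, hp3⟩ :=
          step_sem stroka.toList r2 2 _ hd2 hb2 hp2 h3
        push_cast at hc2
        have hg2' : (PySem.List.pyGet? (pvSplit stroka.toList) (2 : Int)).getD [] =
            (pvSplit r2).headD [] := by simpa using hg2
        simp only [if_pos hc0, if_pos hc1, if_pos hc2, hg0', hg1', hg2', hw1, hw2, hw3]
        simp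
      · obtain ⟨hw3, hlen3⟩ := step_no stroka.toList r2 2 _ hd2 hb2 hp2 h3
        have hc2 : ¬ ((2 : Int) < ((pvSplit stroka.toList).length : Int) - 1) := by
          rw [hlen3]; norm_num
        simp only [if_pos hc0, if_pos hc1, if_neg hc2, hg0', hg1', hw1, hw2, hw3]
        simp
    · obtain ⟨hw2, hlen2⟩ := step_no stroka.toList r1 1 _ hd1 hb1 hp1 h2
      have hc1 : ¬ ((1 : Int) < ((pvSplit stroka.toList).length : Int) - 1) := by
        rw [hlen2]; norm_num
      have hc2 : ¬ ((2 : Int) < ((pvSplit stroka.toList).length : Int) - 1) := by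
        rw [hlen2]; norm_num
      simp only [if_pos hc0, if_neg hc1, if_neg hc2, hg0', hw1, hw2, pvWhileA_len]
      simp
  · obtain ⟨hw1, hlen1⟩ := step_no stroka.toList stroka.toList 0 0
      List.drop_zero (Nat.zero_le _) (by simp) h1
    have hc0 : ¬ ((0 : Int) < ((pvSplit stroka.toList).length : Int) - 1) := by
      rw [hlen1]; norm_num
    have hc1 : ¬ ((1 : Int) < ((pvSplit stroka.toList).length : Int) - 1) := by
      rw [hlen1]; norm_num
    have hc2 : ¬ ((2 : Int) < ((pvSplit stroka.toList).length : Int) - 1) := by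
      rw [hlen1]; norm_num
    simp only [if_neg hc0, if_neg hc1, if_neg hc2, hw1, pvWhileA_len]
    simp
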